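-- pv_equiv track=rewrite | github.com/Raosari/problems-leetcode-hackerrank | leetCode/ENCORA/imocha_encora.py | Solution
-- ===== SOURCE A (Python) =====
-- def Solution(input,k):
--     if len(input) > k:
--         return -1
--
--     odd_cap = 0
--     even_cap = 0
--     result = 0
--     for idx, char in enumerate(input,start=1):
--         if not char.isalpha():
--             return -1
--         if char.isupper():
--             if idx % 2 == 0:
--                 even_cap += 1
--             else:
--                 odd_cap += 1
--             if odd_cap > 1 or even_cap > 1:
--                 return -1
--         result += ord(char)
--     return result
-- ===== SOURCE B (Python) =====
-- def Solution(input, k):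
--     if len(input) > k:
--         return -1
--     if not all(c.isalpha() for c in input):
--         return -1
--     odd = sum(1 for i, c in enumerate(input) if c.isupper() and i % 2 == 0)
--     even = sum(1 for i, c in enumerate(input) if c.isupper() and i % 2 == 1)
--     if odd > 1 or even > 1:
--         return -1
--     return sum(ord(c) for c in input)
-- ===== Notes on version B (the rewrite author's own statement) =====
-- stated objective: simpler
-- what changed: Replaces A's single interleaved early-return loop carrying four pieces of state with separate passes: a length guard, an all-alpha check, two parity-filtered uppercase counts over enumerate, and a final ord sum.
import Mathlib
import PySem

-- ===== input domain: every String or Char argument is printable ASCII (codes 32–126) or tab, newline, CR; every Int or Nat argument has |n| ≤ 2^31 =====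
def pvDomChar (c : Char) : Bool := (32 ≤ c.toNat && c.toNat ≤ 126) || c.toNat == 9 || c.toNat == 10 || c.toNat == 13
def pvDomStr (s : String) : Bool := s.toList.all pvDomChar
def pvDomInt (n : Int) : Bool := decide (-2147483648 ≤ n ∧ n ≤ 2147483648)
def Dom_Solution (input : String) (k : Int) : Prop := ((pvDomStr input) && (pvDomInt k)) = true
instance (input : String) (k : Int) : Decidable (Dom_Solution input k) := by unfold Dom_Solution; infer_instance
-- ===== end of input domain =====

-- B: validate-then-sum in separate passes (length guard, all-alpha scan, two parity
-- uppercase counts, then the ord sum) instead of A's single interleaved early-return loop;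
-- objective: simpler.


-- ===== PORT A =====
-- A's for-loop over enumerate(input, start=1) with early returns, as structural recursion
-- over the same state (idx, odd_cap, even_cap, result).
def solLoopA : List Char → Int → Nat → Nat → Int → Int
  | [], _, _, _, result => result
  | c :: rest, idx, oddCap, evenCap, result =>
    if ¬ PySem.Chars.isalpha c then -1
    else if PySem.Chars.isupper c then
      let oddCap' := if idx % 2 == 0 then oddCap else oddCap + 1
      let evenCap' := if idx % 2 == 0 then evenCap + 1 else evenCap
      if oddCap' > 1 ∨ evenCap' > 1 then -1
      else solLoopA rest (idx + 1) oddCap' evenCap' (result + (c.toNat : Int))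
    else solLoopA rest (idx + 1) oddCap evenCap (result + (c.toNat : Int))

def Solution (input : String) (k : Int) : Int :=
  if PySem.Str.len input > k then -1
  else solLoopA input.toList 1 0 0 0

-- ===== PORT B =====
def Solution_alt (input : String) (k : Int) : Int :=
  if PySem.Str.len input > k then -1
  else if ¬ input.toList.all (fun c => PySem.Chars.isalpha c) then -1
  else
    let odd := ((PySem.List.enumerate input.toList 0).filter
      (fun p => PySem.Chars.isupper p.2 && p.1 % 2 == 0)).length
    let even := ((PySem.List.enumerate input.toList 0).filter
      (fun p => PySem.Chars.isupper p.2 && p.1 % 2 == 1)).length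
    if odd > 1 ∨ even > 1 then -1
    else input.toList.foldl (fun acc c => acc + (c.toNat : Int)) 0

-- ===== PRECONDITION & SPEC =====
def Spec_Solution (input : String) (k : Int) (out : Int) : Prop := out = Solution_alt input k
instance (input : String) (k : Int) (out : Int) : Decidable (Spec_Solution input k out) := by unfold Spec_Solution; infer_instance

-- ===== CLAIM (what is proved, stated in full; the proofs are below) =====
def Claim_equal_Solution : Prop := ∀ (input : String) (k : Int), Dom_Solution input k → Spec_Solution input k (Solution input k)

-- ===== LEMMAS AND PROOFS =====

-- uppercase count at alternating positions: flag b says whether the head's position counts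
def cntU : Bool → List Char → Nat
  | _, [] => 0
  | b, c :: cs => (if PySem.Chars.isupper c && b then 1 else 0) + cntU (!b) cs

def sumOrd : List Char → Int
  | [] => 0
  | c :: cs => (c.toNat : Int) + sumOrd cs

theorem foldl_sumOrd (cs : List Char) : ∀ (r : Int),
    cs.foldl (fun acc c => acc + (c.toNat : Int)) r = r + sumOrd cs := by
  induction cs with
  | nil => intro r; simp [sumOrd]
  | cons c cs ih => intro r; simp [List.foldl, sumOrd, ih]; ring

theorem filter_enum_cnt (r : Int) (hr : r = 0 ∨ r = 1) (cs : List Char) : ∀ (n : Int), 0 ≤ n →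
    ((PySem.List.enumerate cs n).filter
      (fun p => PySem.Chars.isupper p.2 && p.1 % 2 == r)).length
      = cntU (n % 2 == r) cs := by
  induction cs with
  | nil => intro n _; simp [PySem.List.enumerate, cntU]
  | cons c cs ih =>
    intro n hn
    have hflip : ((n + 1) % 2 == r) = !(n % 2 == r) := by
      have h2 : n % 2 = 0 ∨ n % 2 = 1 := by omega
      rcases hr with hr | hr <;> rcases h2 with h2 | h2 <;>
        simp [hr, h2] <;> omega
    rw [PySem.List.enumerate_cons, List.filter_cons]
    by_cases hu : PySem.Chars.isupper c
    · by_cases hp : n % 2 = r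
      · simp [hu, hp, cntU, ih (n + 1) (by omega), hflip]; omega
      · simp [hu, hp, cntU, ih (n + 1) (by omega), hflip]
    · simp [hu, cntU, ih (n + 1) (by omega), hflip]

set_option maxRecDepth 4000 in
theorem loopA_eq (cs : List Char) : ∀ (idx : Int) (oc ec : Nat) (res : Int),
    oc ≤ 1 → ec ≤ 1 →
    solLoopA cs idx oc ec res =
      if cs.all (fun c => PySem.Chars.isalpha c)
          ∧ oc + cntU (!(idx % 2 == 0)) cs ≤ 1
          ∧ ec + cntU (idx % 2 == 0) cs ≤ 1
        then res + sumOrd cs else -1 := by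
  induction cs with
  | nil =>
    intro idx oc ec res hoc hec
    rw [if_pos ⟨by simp, by simpa [cntU], by simpa [cntU]⟩]
    simp [solLoopA, sumOrd]
  | cons c cs ih =>
    intro idx oc ec res hoc hec
    have hflip : ((idx + 1) % 2 == 0) = !(idx % 2 == 0) := by
      have h2 : idx % 2 = 0 ∨ idx % 2 = 1 := by omega
      rcases h2 with h2 | h2 <;> simp [h2] <;> omega
    by_cases ha : PySem.Chars.isalpha c
    · have ha' : PySem.Chars.isalpha c = true := ha
      by_cases hu : PySem.Chars.isupper c
      · have hu' : PySem.Chars.isupper c = true := hu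
        by_cases hb : (idx % 2 == (0 : Int)) = true
        · -- even 1-based index: even_cap is bumped
          simp only [solLoopA, ha', hu', hb, List.all_cons, cntU, hflip, sumOrd,
            Bool.not_true, Bool.and_true, Bool.and_false, Bool.true_and,
            Bool.false_eq_true, Bool.true_eq_false, not_true, if_true, if_false,
            ite_true, ite_false, true_and, Nat.zero_add]
          by_cases hover : ec + 1 > 1
          · rw [if_pos (Or.inr hover), if_neg (by rintro ⟨-, -, h3⟩; omega)]
          · rw [if_neg (by omega),
              ih (idx + 1) oc (ec + 1) (res + (c.toNat : Int)) hoc (by omega)]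
            simp only [hflip, hb, Bool.not_true, Bool.not_false]
            by_cases hall : cs.all (fun c => PySem.Chars.isalpha c) = true <;>
              simp only [hall, true_and, false_and, if_false, if_neg (id (fun h => h : ¬False))] <;>
              [skip; rfl]
            split_ifs <;> first | ring1 | omega | (exfalso; omega)
        · have hb' : (idx % 2 == (0 : Int)) = false := eq_false_of_ne_true hb
          -- odd 1-based index: odd_cap is bumped
          simp only [solLoopA, ha', hu', hb', List.all_cons, cntU, hflip, sumOrd,
            Bool.not_false, Bool.and_true, Bool.and_false, Bool.true_and,
            Bool.false_eq_true, Bool.true_eq_false, not_true, if_true, if_false,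
            ite_true, ite_false, true_and, Nat.zero_add]
          by_cases hover : oc + 1 > 1
          · rw [if_pos (Or.inl hover), if_neg (by rintro ⟨-, h2, -⟩; omega)]
          · rw [if_neg (by omega),
              ih (idx + 1) (oc + 1) ec (res + (c.toNat : Int)) (by omega) hec]
            simp only [hflip, hb', Bool.not_false, Bool.not_true]
            by_cases hall : cs.all (fun c => PySem.Chars.isalpha c) = true <;>
              simp only [hall, true_and, false_and, if_false, if_neg (id (fun h => h : ¬False))] <;>
              [skip; rfl]
            split_ifs <;> first | ring1 | omega | (exfalso; omega)
      · have hu' : PySem.Chars.isupper c = false := eq_false_of_ne_true hu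
        simp only [solLoopA, ha', hu', List.all_cons, cntU, hflip, sumOrd,
          Bool.false_and, Bool.true_and, Bool.false_eq_true, not_true, if_true, if_false,
          ite_true, ite_false, true_and, Nat.zero_add]
        rw [ih (idx + 1) oc ec (res + (c.toNat : Int)) hoc hec]
        simp only [hflip, Bool.not_not]
        split_ifs <;> first | ring1 | omega | (exfalso; omega)
    · simp [solLoopA, List.all_cons, ha]

-- ===== VERDICT (by name: the statement is the Claim_ definition above) =====
theorem Solution_spec : Claim_equal_Solution := by
  intro input k _
  unfold Spec_Solution Solution Solution_alt
  by_cases hk : PySem.Str.len input > k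
  · rw [if_pos hk, if_pos hk]
  · rw [if_neg hk, if_neg hk,
      loopA_eq input.toList 1 0 0 0 (by omega) (by omega),
      filter_enum_cnt 0 (Or.inl rfl) input.toList 0 (by omega),
      filter_enum_cnt 1 (Or.inr rfl) input.toList 0 (by omega),
      show ((0 : Int) % 2 == (0 : Int)) = true from by decide,
      show ((0 : Int) % 2 == (1 : Int)) = false from by decide,
      show ((1 : Int) % 2 == (0 : Int)) = false from by decide]
    simp only [Bool.not_false, Nat.zero_add, zero_add]
    by_cases hall : input.toList.all (fun c => PySem.Chars.isalpha c) = true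
    · rw [if_neg (not_not_intro hall)]
      try dsimp only
      rw [foldl_sumOrd]
      by_cases hov : cntU true input.toList ≤ 1 ∧ cntU false input.toList ≤ 1
      · obtain ⟨h1, h2⟩ := hov
        rw [if_pos ⟨hall, h1, h2⟩, if_neg (by omega)]
        norm_num
      · rw [if_neg (by rintro ⟨-, h1, h2⟩; exact hov ⟨h1, h2⟩),
          if_pos (by omega)]
    · rw [if_neg (by rintro ⟨h, -, -⟩; exact hall h), if_pos hall]
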